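-- pv_equiv track=rewrite | github.com/bryokim/alx-higher_level_programming | 0x0B-python-input_output/101-stats.py | get_size_and_code_nonstrict
-- ===== SOURCE A (Python) =====
-- def get_size_and_code_nonstrict(line: str):
--     """
--     Read file size and status code from line.
--
--     Reads the file size and code non-sparingly provided line is a
--     valid string.\n
--     Does not check validity of the file size or status code.\n
--     That is whether file size is an integer between 1 and 1024(exclusive) or
--     whether status code is found in status_codes dictionary.
--
--     Therefore extra checks must be done on the values returned from this
--     function to check their validity before being used.
--
--     Args:
--         line (str): Line of text as red from stdin.
--
--     Returns:
--         tuple: Tuple of both size and code.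
--     """
--     size = ""
--     code = ""
--     i = 0
--
--     for char in reversed(line):
--         if char == ' ':
--             i += 1
--         elif not i:
--             size += char
--         elif i:
--             code += char
--
--         if i == 2:
--             break
--     if size[0] == '\n':
--         size = size[1:]
--     return (code[-1::-1], size[-1::-1])
-- ===== SOURCE B (Python) =====
-- def get_size_and_code_nonstrict(line):
--     """Split-based re-implementation: strip one trailing newline, split on
--     spaces, and take the last token as size and the one before it as code."""
--     tokens = line.removesuffix('\n').split(' ')
--     code = tokens[-2] if len(tokens) >= 2 else ""
--     return (code, tokens[-1])
-- ===== Notes on version B (the rewrite author's own statement) =====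
-- stated objective: idiomatic
-- what changed: Replaced the backward character-by-character scan with its manual space counter and break by trimming one trailing newline and splitting the line on ' ' once (a single C-level str.split instead of a per-character Python loop), taking the last token as size and the second-to-last (if any) as code.
-- outside the precondition, e.g. on get_size_and_code_nonstrict(' '): A raises IndexError, B returns ('', '')
import Mathlib
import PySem

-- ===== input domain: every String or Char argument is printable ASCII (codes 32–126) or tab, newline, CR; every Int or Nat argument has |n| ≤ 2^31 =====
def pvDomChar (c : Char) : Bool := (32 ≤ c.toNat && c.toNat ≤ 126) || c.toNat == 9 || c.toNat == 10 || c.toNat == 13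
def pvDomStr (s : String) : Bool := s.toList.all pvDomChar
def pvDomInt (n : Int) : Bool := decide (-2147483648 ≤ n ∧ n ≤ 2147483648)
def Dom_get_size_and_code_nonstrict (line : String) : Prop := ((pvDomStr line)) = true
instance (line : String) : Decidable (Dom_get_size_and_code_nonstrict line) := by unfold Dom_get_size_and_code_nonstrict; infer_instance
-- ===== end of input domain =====

-- B replaces A's backward character-by-character scan (manual space counter, break at the
-- second space) with one split on ' ' after trimming a single trailing newline, indexing the
-- last two tokens — simpler, no hand-rolled state machine.

-- ===== PORT A =====
-- the `for char in reversed(line)` loop with its `if i == 2: break`; strings built by `+=`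
-- are carried as List Char (size, code), i is the space counter.
def pvLoopA : List Char → List Char → List Char → Int → List Char × List Char
  | [], size, code, _ => (size, code)
  | ch :: rest, size, code, i =>
      let st :=
        if ch = ' ' then (size, code, i + 1)
        else if i = 0 then (size ++ [ch], code, i)
        else (size, code ++ [ch], i)
      if st.2.2 = 2 then (st.1, st.2.1) else pvLoopA rest st.1 st.2.1 st.2.2

def get_size_and_code_nonstrict (line : String) : String × String :=
  let p := pvLoopA line.toList.reverse [] [] 0
  -- size[0] == '\n' → size = size[1:]  (size[0] raises on empty size: excluded by Pre_)
  let size := if PySem.List.pyGet? p.1 0 = some '\n'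
              then PySem.List.slice p.1 (some 1) none else p.1
  -- code[-1::-1] / size[-1::-1] are full reverse slices
  (String.ofList ((PySem.List.slice? p.2 none none (-1)).getD []),
   String.ofList ((PySem.List.slice? size none none (-1)).getD []))

-- ===== PORT B =====
def get_size_and_code_nonstrict_alt (line : String) : String × String :=
  -- line.removesuffix('\n')
  let stripped := if PySem.Chars.endswith line.toList ['\n'] then line.toList.dropLast
                  else line.toList
  let tokens := PySem.Chars.splitOn stripped [' ']        -- line.split(' ')
  -- tokens[-2] if len(tokens) >= 2 else ""   (guarded, so the lookup is always `some`)
  let code := if 2 ≤ tokens.length then (PySem.List.pyGet? tokens (-2)).getD [] else []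
  (String.ofList code, String.ofList ((PySem.List.pyGet? tokens (-1)).getD []))   -- tokens[-1]

-- ===== PRECONDITION & SPEC =====
-- Pre_ excludes exactly the inputs where A raises IndexError at size[0]:
-- the empty line and lines whose last character is a space (size stays "").
def Pre_get_size_and_code_nonstrict (line : String) : Prop :=
  line.toList ≠ [] ∧ line.toList.getLast? ≠ some ' '
instance (line : String) : Decidable (Pre_get_size_and_code_nonstrict line) := by
  unfold Pre_get_size_and_code_nonstrict; infer_instance

def pvWitness_get_size_and_code_nonstrict : String := "GET /x 404 1024\n"

def Spec_get_size_and_code_nonstrict (line : String) (out : String × String) : Prop :=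
  out = get_size_and_code_nonstrict_alt line
instance (line : String) (out : String × String) : Decidable (Spec_get_size_and_code_nonstrict line out) := by
  unfold Spec_get_size_and_code_nonstrict; infer_instance

-- ===== CLAIM (what is proved, stated in full; the proofs are below) =====
def Claim_equal_get_size_and_code_nonstrict : Prop :=
  ∀ (line : String), Dom_get_size_and_code_nonstrict line →
    Pre_get_size_and_code_nonstrict line →
    Spec_get_size_and_code_nonstrict line (get_size_and_code_nonstrict line)

-- ===== LEMMAS AND PROOFS =====

-- cons-style reference splitter (Python's str.split(' '))
def pvSplit : List Char → List (List Char)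
  | [] => [[]]
  | c :: l => if c = ' ' then [] :: pvSplit l else (pvSplit l).modifyHead (c :: ·)

lemma pvSplit_ne_nil (l : List Char) : pvSplit l ≠ [] := by
  induction l with
  | nil => simp [pvSplit]
  | cons c l ih =>
      simp only [pvSplit]
      split_ifs
      · simp
      · cases h : pvSplit l with
        | nil => exact absurd h ih
        | cons a t => simp [List.modifyHead]

lemma splitOn_go_eq (fuel : Nat) : ∀ (l cur : List Char) (acc : List (List Char)),
    l.length < fuel →
    PySem.Chars.splitOn.go [' '] fuel l cur acc
      = acc.reverse ++ (pvSplit l).modifyHead (cur.reverse ++ ·) := by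
  induction fuel with
  | zero => intro l cur acc h; omega
  | succ fuel ih =>
      intro l cur acc h
      cases l with
      | nil => simp [PySem.Chars.splitOn.go, pvSplit, List.modifyHead]
      | cons c rest =>
          simp only [PySem.Chars.splitOn.go]
          by_cases hc : c = ' '
          · subst hc
            rw [if_pos (by simp)]
            simp only [List.length_cons, List.length_nil, List.drop_succ_cons, List.drop_zero]
            rw [ih rest [] (cur.reverse :: acc) (by simpa using Nat.lt_of_succ_lt_succ h)]
            have hps : pvSplit (' ' :: rest) = [] :: pvSplit rest := by
              simp [pvSplit]
            rw [hps]
            obtain ⟨a, t, hr⟩ : ∃ a t, pvSplit rest = a :: t := by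
              cases h' : pvSplit rest with
              | nil => exact absurd h' (pvSplit_ne_nil rest)
              | cons a t => exact ⟨a, t, rfl⟩
            rw [hr]
            simp only [List.modifyHead, List.reverse_cons, List.reverse_nil,
              List.nil_append, List.append_assoc, List.cons_append, List.append_nil]
          · rw [if_neg (by simp [List.isPrefixOf]; exact fun e => hc e.symm)]
            rw [ih rest (c :: cur) acc (by simpa using Nat.lt_of_succ_lt_succ h)]
            have hps : pvSplit (c :: rest) = (pvSplit rest).modifyHead (c :: ·) := by
              simp only [pvSplit]; rw [if_neg hc]
            rw [hps]
            obtain ⟨a, t, hr⟩ : ∃ a t, pvSplit rest = a :: t := by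
              cases h' : pvSplit rest with
              | nil => exact absurd h' (pvSplit_ne_nil rest)
              | cons a t => exact ⟨a, t, rfl⟩
            rw [hr]
            simp only [List.modifyHead, List.reverse_cons,
              List.nil_append, List.append_assoc, List.cons_append]

lemma splitOn_eq_pvSplit (l : List Char) :
    PySem.Chars.splitOn l [' '] = pvSplit l := by
  unfold PySem.Chars.splitOn
  rw [splitOn_go_eq (l.length + 1) l [] [] (by omega)]
  obtain ⟨a, t, hr⟩ : ∃ a t, pvSplit l = a :: t := by
    cases h' : pvSplit l with
    | nil => exact absurd h' (pvSplit_ne_nil l)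
    | cons a t => exact ⟨a, t, rfl⟩
  rw [hr]; simp only [List.modifyHead, List.reverse_nil,
              List.nil_append]

lemma pvSplit_snoc (l : List Char) (c : Char) :
    pvSplit (l ++ [c]) =
      if c = ' ' then pvSplit l ++ [[]]
      else (pvSplit l).dropLast ++ [((pvSplit l).getLast?.getD []) ++ [c]] := by
  induction l with
  | nil =>
      by_cases hc : c = ' ' <;> simp [pvSplit, hc, List.modifyHead]
  | cons a l ih =>
      have hcons : ∀ (b : Char) (m : List Char), pvSplit (b :: m)
          = if b = ' ' then [] :: pvSplit m else (pvSplit m).modifyHead (b :: ·) := by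
        intro b m; simp [pvSplit]
      obtain ⟨x, t, hT⟩ : ∃ x t, pvSplit l = x :: t := by
        cases h' : pvSplit l with
        | nil => exact absurd h' (pvSplit_ne_nil l)
        | cons x t => exact ⟨x, t, rfl⟩
      rw [List.cons_append, hcons a (l ++ [c]), hcons a l, ih, hT]
      by_cases hc : c = ' ' <;> by_cases ha : a = ' ' <;>
        simp only [hc, ha, if_pos, if_neg,
          not_false_iff]
      · simp
      · cases t with
        | nil => simp [List.modifyHead]
        | cons u t' => simp [List.modifyHead]
      · cases t with
        | nil => simp
        | cons u t' => simp
      · cases t with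
        | nil => simp [List.modifyHead]
        | cons u t' => simp [List.modifyHead]

-- A's loop computes take/drop-while of the reversed line
lemma pvLoopA_one (r : List Char) : ∀ (s c : List Char),
    pvLoopA r s c 1 = (s, c ++ r.takeWhile (· ≠ ' ')) := by
  induction r with
  | nil => intro s c; simp [pvLoopA]
  | cons h t ih =>
      intro s c
      by_cases hh : h = ' '
      · subst hh; simp [pvLoopA]
      · simp [pvLoopA, hh, ih]

lemma pvLoopA_zero (r : List Char) : ∀ (s c : List Char),
    pvLoopA r s c 0 = (s ++ r.takeWhile (· ≠ ' '),
                       c ++ ((r.dropWhile (· ≠ ' ')).drop 1).takeWhile (· ≠ ' ')) := by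
  induction r with
  | nil => intro s c; simp [pvLoopA]
  | cons h t ih =>
      intro s c
      by_cases hh : h = ' '
      · subst hh; simp [pvLoopA, pvLoopA_one]
      · simp [pvLoopA, hh, ih]

lemma pyGet?_concat_neg1 {α : Type} (xs : List α) (y : α) :
    PySem.List.pyGet? (xs ++ [y]) (-1) = some y := by
  simp [PySem.List.pyGet?, PySem.List.pyIdx?]

lemma pyGet?_concat_neg2 {α : Type} (xs : List α) (y : α) :
    PySem.List.pyGet? (xs ++ [y]) (-2) = xs.getLast? := by
  rcases List.eq_nil_or_concat xs with h | ⟨zs, z, h⟩ <;> subst h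
  · simp [PySem.List.pyGet?, PySem.List.pyIdx?]
  · simp [PySem.List.pyGet?, PySem.List.pyIdx?, List.getElem?_append]

lemma pyGet?_neg1_getLast? {α : Type} (xs : List α) :
    PySem.List.pyGet? xs (-1) = xs.getLast? := by
  rcases List.eq_nil_or_concat xs with h | ⟨zs, z, h⟩ <;> subst h
  · simp [PySem.List.pyGet?, PySem.List.pyIdx?]
  · simp only [List.concat_eq_append]
    rw [pyGet?_concat_neg1]; simp

lemma pyGet?_neg2_dropLast {α : Type} (xs : List α) :
    PySem.List.pyGet? xs (-2) = xs.dropLast.getLast? := by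
  rcases List.eq_nil_or_concat xs with h | ⟨zs, z, h⟩ <;> subst h
  · simp [PySem.List.pyGet?, PySem.List.pyIdx?]
  · simp only [List.concat_eq_append]
    rw [pyGet?_concat_neg2]; simp

-- the core correspondence: B's last two tokens are A's take/drop-while values
lemma pvCore (m : List Char) :
    (PySem.List.pyGet? (pvSplit m) (-1)).getD []
        = (m.reverse.takeWhile (· ≠ ' ')).reverse
    ∧ (if 2 ≤ (pvSplit m).length then (PySem.List.pyGet? (pvSplit m) (-2)).getD [] else [])
        = (((m.reverse.dropWhile (· ≠ ' ')).drop 1).takeWhile (· ≠ ' ')).reverse := by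
  induction m using List.reverseRecOn with
  | nil => simp [pvSplit, PySem.List.pyGet?, PySem.List.pyIdx?]
  | append_singleton l c ih =>
      obtain ⟨ih1, ih2⟩ := ih
      have hlen : 1 ≤ (pvSplit l).length := by
        cases h' : pvSplit l with
        | nil => exact absurd h' (pvSplit_ne_nil l)
        | cons x t => simp
      by_cases hc : c = ' '
      · subst hc
        rw [pvSplit_snoc, if_pos rfl]
        constructor
        · rw [pyGet?_concat_neg1]
          simp
        · rw [pyGet?_concat_neg2]
          rw [if_pos (by simp; omega)]
          rw [← pyGet?_neg1_getLast?]
          simpa [List.dropWhile] using ih1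
      · rw [pvSplit_snoc, if_neg hc]
        constructor
        · rw [pyGet?_concat_neg1]
          simp only [Option.getD_some, List.reverse_append, List.reverse_cons]
          rw [← pyGet?_neg1_getLast?]
          simp [hc, ih1]
        · rw [pyGet?_concat_neg2]
          have hlen2 : ((pvSplit l).dropLast ++ [(pvSplit l).getLast?.getD [] ++ [c]]).length
              = (pvSplit l).length := by
            simp; omega
          rw [hlen2]
          rw [← pyGet?_neg2_dropLast]
          have hdw : (l ++ [c]).reverse.dropWhile (· ≠ ' ')
              = l.reverse.dropWhile (· ≠ ' ') := by
            simp [hc]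
          rw [hdw]
          exact ih2

-- ===== VERDICT (by name: the statement is the Claim_ definition above) =====
theorem get_size_and_code_nonstrict_spec : Claim_equal_get_size_and_code_nonstrict := by
  intro line _ hpre
  unfold Spec_get_size_and_code_nonstrict
  obtain ⟨hne, hlast⟩ := hpre
  rcases List.eq_nil_or_concat line.toList with h | ⟨dl, c, h⟩
  · exact absurd h hne
  simp only [List.concat_eq_append] at h
  have hc : c ≠ ' ' := by
    intro e
    apply hlast
    rw [h, e, List.getLast?_concat]
  simp only [get_size_and_code_nonstrict, get_size_and_code_nonstrict_alt]
  rw [h]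
  have hrv : (dl ++ [c]).reverse = c :: dl.reverse := by simp
  rw [hrv, pvLoopA_zero]
  simp only [List.nil_append]
  have htw : (c :: dl.reverse).takeWhile (· ≠ ' ') = c :: dl.reverse.takeWhile (· ≠ ' ') := by
    simp [hc]
  have hdw : (c :: dl.reverse).dropWhile (· ≠ ' ') = dl.reverse.dropWhile (· ≠ ' ') := by
    simp [hc]
  rw [htw, hdw]
  have hget : PySem.List.pyGet? (c :: dl.reverse.takeWhile (· ≠ ' ')) 0 = some c := by
    simp [PySem.List.pyGet?, PySem.List.pyIdx?]
  rw [hget]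
  by_cases hcn : c = '\n'
  · subst hcn
    rw [if_pos rfl]
    have hends : PySem.Chars.endswith (dl ++ ['\n']) ['\n'] = true :=
      (PySem.Chars.endswith_iff _ _).mpr ⟨dl, rfl⟩
    rw [if_pos hends, List.dropLast_concat, splitOn_eq_pvSplit]
    obtain ⟨c1, c2⟩ := pvCore dl
    have hslice : PySem.List.slice ('\n' :: dl.reverse.takeWhile (· ≠ ' ')) (some 1) none
        = dl.reverse.takeWhile (· ≠ ' ') := by
      rw [PySem.List.slice_from _ (by norm_num : (0:Int) ≤ 1)]
      simp
    rw [hslice]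
    rw [PySem.List.slice?_none_none_neg_one, PySem.List.slice?_none_none_neg_one]
    simp only [Option.getD_some]
    rw [c1, c2]
  · rw [if_neg (by simp [hcn])]
    have hends : PySem.Chars.endswith (dl ++ [c]) ['\n'] = false := by
      rw [← Bool.not_eq_true]
      intro hsuf
      obtain ⟨t, ht⟩ := (PySem.Chars.endswith_iff _ _).mp hsuf
      apply hcn
      have hgl := congrArg List.getLast? ht
      simp only [List.getLast?_concat] at hgl
      injection hgl with hgl'
      exact hgl'.symm
    simp only [hends, Bool.false_eq_true, if_false]
    rw [splitOn_eq_pvSplit]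
    obtain ⟨c1, c2⟩ := pvCore (dl ++ [c])
    rw [PySem.List.slice?_none_none_neg_one, PySem.List.slice?_none_none_neg_one]
    simp only [Option.getD_some]
    rw [c1, c2, hrv, htw, hdw]
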